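-- pv_equiv track=rewrite | github.com/olliekennedy/advent-of-code | 2020-python/day-11/day_11.py | construct_seat_layout
-- ===== SOURCE A (Python) =====
-- def construct_seat_layout(occupied_seats, empty_seats, height, width) -> list[list[str]]:
--     seat_layout = []
--     for _ in range(height):
--         seat_layout.append([])
--     for y in range(height):
--         for x in range(width):
--             coordinates = tuple([x, y])
--             if coordinates in occupied_seats:
--                 seat_layout[y].append('#')
--             elif coordinates in empty_seats:
--                 seat_layout[y].append('L')
--             else:
--                 seat_layout[y].append('.')
--     return seat_layout
-- ===== SOURCE B (Python) =====
-- def construct_seat_layout(occupied_seats, empty_seats, height, width) -> list[list[str]]: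
--     seat_layout = [['.'] * width for _ in range(height)]
--     for (x, y) in empty_seats:
--         if 0 <= x < width and 0 <= y < height:
--             seat_layout[y][x] = 'L'
--     for (x, y) in occupied_seats:
--         if 0 <= x < width and 0 <= y < height:
--             seat_layout[y][x] = '#'
--     return seat_layout
-- ===== Notes on version B (the rewrite author's own statement) =====
-- stated objective: faster
-- what changed: Instead of scanning every grid cell and testing membership in both seat lists, B builds a default all-'.' grid and scatters the known seat coordinates onto it (empty first, occupied last so '#' wins, matching A's precedence), bounds-guarding each coordinate.
import Mathlib
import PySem

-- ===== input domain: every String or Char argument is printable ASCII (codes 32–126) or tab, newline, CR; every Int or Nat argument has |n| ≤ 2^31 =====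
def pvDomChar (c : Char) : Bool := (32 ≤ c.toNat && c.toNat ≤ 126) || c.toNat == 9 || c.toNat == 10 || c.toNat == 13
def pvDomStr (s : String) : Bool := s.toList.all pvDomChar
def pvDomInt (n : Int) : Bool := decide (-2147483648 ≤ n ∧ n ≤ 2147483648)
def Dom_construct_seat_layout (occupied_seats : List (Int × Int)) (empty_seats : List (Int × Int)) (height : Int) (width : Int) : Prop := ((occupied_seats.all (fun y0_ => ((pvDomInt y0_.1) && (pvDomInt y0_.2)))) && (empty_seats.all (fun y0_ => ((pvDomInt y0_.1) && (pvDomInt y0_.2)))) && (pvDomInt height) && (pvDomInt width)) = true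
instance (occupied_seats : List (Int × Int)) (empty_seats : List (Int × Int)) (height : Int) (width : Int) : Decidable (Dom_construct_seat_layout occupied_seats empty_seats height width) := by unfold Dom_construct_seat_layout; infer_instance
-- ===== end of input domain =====

-- B replaces A's full-grid scan (two list-membership tests per cell) by a default '.' grid plus a
-- bounds-guarded scatter of the seat coordinates (occupied written last, so '#' wins as in A); objective: faster.

-- ===== PORT A =====
def construct_seat_layout (occupied_seats : List (Int × Int)) (empty_seats : List (Int × Int)) (height : Int) (width : Int) : List (List String) :=
  let seat_layout : List (List String) :=
    (PySem.List.pyRange 0 height 1).foldl (fun acc _ => acc ++ [[]]) []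
  (PySem.List.pyRange 0 height 1).foldl (fun sl y =>
    (PySem.List.pyRange 0 width 1).foldl (fun sl x =>
      let coordinates : Int × Int := (x, y)
      if occupied_seats.contains coordinates then
        sl.set y.toNat (sl.getD y.toNat [] ++ ["#"])
      else if empty_seats.contains coordinates then
        sl.set y.toNat (sl.getD y.toNat [] ++ ["L"])
      else
        sl.set y.toNat (sl.getD y.toNat [] ++ ["."])) sl) seat_layout

-- ===== PORT B =====
-- one scatter pass of Source B (the body of each of its two for-loops)
def pvScatter (letter : String) (height : Int) (width : Int) (coords : List (Int × Int)) (g : List (List String)) : List (List String) :=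
  coords.foldl (fun g p =>
    if 0 ≤ p.1 ∧ p.1 < width ∧ 0 ≤ p.2 ∧ p.2 < height then
      g.set p.2.toNat ((g.getD p.2.toNat []).set p.1.toNat letter)
    else g) g

def construct_seat_layout_alt (occupied_seats : List (Int × Int)) (empty_seats : List (Int × Int)) (height : Int) (width : Int) : List (List String) :=
  let g0 : List (List String) := (List.range height.toNat).map (fun _ => List.replicate width.toNat ".")
  pvScatter "#" height width occupied_seats (pvScatter "L" height width empty_seats g0)

-- ===== PRECONDITION & SPEC =====
def Spec_construct_seat_layout (occupied_seats : List (Int × Int)) (empty_seats : List (Int × Int)) (height : Int) (width : Int) (out : List (List String)) : Prop := out = construct_seat_layout_alt occupied_seats empty_seats height width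
instance (occupied_seats : List (Int × Int)) (empty_seats : List (Int × Int)) (height : Int) (width : Int) (out : List (List String)) : Decidable (Spec_construct_seat_layout occupied_seats empty_seats height width out) := by unfold Spec_construct_seat_layout; infer_instance

-- ===== CLAIM (what is proved, stated in full; the proofs are below) =====
def Claim_equal_construct_seat_layout : Prop := ∀ (occupied_seats : List (Int × Int)) (empty_seats : List (Int × Int)) (height : Int) (width : Int), Dom_construct_seat_layout occupied_seats empty_seats height width → Spec_construct_seat_layout occupied_seats empty_seats height width (construct_seat_layout occupied_seats empty_seats height width)

-- ===== LEMMAS AND PROOFS =====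

-- the common description of the result: cell (x, y) of the grid
def pvCell (occ emp : List (Int × Int)) (x y : Int) : String :=
  if occ.contains (x, y) then "#" else if emp.contains (x, y) then "L" else "."

def pvGrid (occ emp : List (Int × Int)) (H W : Nat) : List (List String) :=
  (List.range H).map (fun (y : Nat) => (List.range W).map (fun (x : Nat) => pvCell occ emp (x : Int) (y : Int)))

-- small getD/set facts used on both sides
theorem pv_getD_set_self {α : Type} (l : List α) (i : Nat) (a : α) (d : α) (h : i < l.length) :
    (l.set i a).getD i d = a := by
  rw [List.getD_eq_getElem?_getD, List.getElem?_set_self h]; rfl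

theorem pv_getD_set_ne {α : Type} (l : List α) (i j : Nat) (a : α) (d : α) (h : i ≠ j) :
    (l.set i a).getD j d = l.getD j d := by
  rw [List.getD_eq_getElem?_getD, List.getElem?_set_ne h, ← List.getD_eq_getElem?_getD]

theorem pv_set_getD_self {α : Type} (l : List α) (i : Nat) (d : α) (h : i < l.length) :
    l.set i (l.getD i d) = l := by
  apply List.ext_getElem?
  intro n
  by_cases hin : i = n
  · subst hin
    rw [List.getElem?_set_self h, List.getD_eq_getElem l d h, List.getElem?_eq_getElem h]
  · rw [List.getElem?_set_ne hin]

theorem pv_set_append_len {α : Type} (as : List α) (b : α) (bs : List α) (v : α) (n : Nat)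
    (hn : n = as.length) : (as ++ b :: bs).set n v = as ++ v :: bs := by
  subst hn
  induction as with
  | nil => rfl
  | cons a t ih => simpa using ih

-- ===== A-side: the scan builds pvGrid row by row =====
theorem pv_rowA (occ emp : List (Int × Int)) (y : Int) (W : Nat) (sl : List (List String))
    (hy : y.toNat < sl.length) :
    (List.range W).foldl (fun sl (x : Nat) =>
        if occ.contains ((x : Int), y) then sl.set y.toNat (sl.getD y.toNat [] ++ ["#"])
        else if emp.contains ((x : Int), y) then sl.set y.toNat (sl.getD y.toNat [] ++ ["L"])
        else sl.set y.toNat (sl.getD y.toNat [] ++ ["."])) sl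
      = sl.set y.toNat (sl.getD y.toNat [] ++ (List.range W).map (fun (x : Nat) => pvCell occ emp (x : Int) y)) := by
  induction W with
  | zero =>
    simp only [List.range_zero, List.foldl_nil, List.map_nil, List.append_nil]
    exact (pv_set_getD_self sl y.toNat [] hy).symm
  | succ W ih =>
    rw [List.range_succ, List.foldl_append, ih]
    simp only [List.foldl_cons, List.foldl_nil]
    have hS : ((sl.set y.toNat (sl.getD y.toNat [] ++ (List.range W).map (fun (x : Nat) => pvCell occ emp (x : Int) y))).getD y.toNat []) =
        sl.getD y.toNat [] ++ (List.range W).map (fun (x : Nat) => pvCell occ emp (x : Int) y) :=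
      pv_getD_set_self _ _ _ _ hy
    split_ifs with h1 h2
    · rw [hS, List.set_set, List.map_append, List.map_singleton, List.append_assoc]
      have hc : pvCell occ emp ((W : Nat) : Int) y = "#" := by unfold pvCell; rw [if_pos h1]
      rw [hc]
    · rw [hS, List.set_set, List.map_append, List.map_singleton, List.append_assoc]
      have hc : pvCell occ emp ((W : Nat) : Int) y = "L" := by unfold pvCell; rw [if_neg h1, if_pos h2]
      rw [hc]
    · rw [hS, List.set_set, List.map_append, List.map_singleton, List.append_assoc]
      have hc : pvCell occ emp ((W : Nat) : Int) y = "." := by unfold pvCell; rw [if_neg h1, if_neg h2]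
      rw [hc]

theorem pv_innerA (occ emp : List (Int × Int)) (w : Int) (y : Int) (sl : List (List String))
    (hy : y.toNat < sl.length) :
    (PySem.List.pyRange 0 w 1).foldl (fun sl (x : Int) =>
        if occ.contains (x, y) then sl.set y.toNat (sl.getD y.toNat [] ++ ["#"])
        else if emp.contains (x, y) then sl.set y.toNat (sl.getD y.toNat [] ++ ["L"])
        else sl.set y.toNat (sl.getD y.toNat [] ++ ["."])) sl
      = sl.set y.toNat (sl.getD y.toNat [] ++ (List.range w.toNat).map (fun (x : Nat) => pvCell occ emp (x : Int) y)) := by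
  rw [PySem.List.pyRange_one, List.foldl_map]
  simp only [zero_add, sub_zero, Int.sub_zero]
  exact pv_rowA occ emp y w.toNat sl hy

theorem pv_outerA (occ emp : List (Int × Int)) (h w : Int) (k : Nat) (hk : k ≤ h.toNat) :
    (List.range k).foldl (fun sl (yk : Nat) =>
        (PySem.List.pyRange 0 w 1).foldl (fun sl (x : Int) =>
          if occ.contains (x, (yk : Int)) then sl.set ((yk : Int)).toNat (sl.getD ((yk : Int)).toNat [] ++ ["#"])
          else if emp.contains (x, (yk : Int)) then sl.set ((yk : Int)).toNat (sl.getD ((yk : Int)).toNat [] ++ ["L"])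
          else sl.set ((yk : Int)).toNat (sl.getD ((yk : Int)).toNat [] ++ ["."])) sl)
      (List.replicate h.toNat ([] : List String))
      = (List.range k).map (fun (yk : Nat) => (List.range w.toNat).map (fun (x : Nat) => pvCell occ emp (x : Int) (yk : Int)))
          ++ List.replicate (h.toNat - k) [] := by
  induction k with
  | zero => simp
  | succ k ih =>
    rw [List.range_succ, List.foldl_append, ih (Nat.le_of_succ_le hk)]
    simp only [List.foldl_cons, List.foldl_nil]
    have hlen : ((List.range k).map (fun (yk : Nat) => (List.range w.toNat).map (fun (x : Nat) => pvCell occ emp (x : Int) (yk : Int)))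
          ++ List.replicate (h.toNat - k) []).length = h.toNat := by
      simp; omega
    have hbound : ((k : Int)).toNat < ((List.range k).map (fun (yk : Nat) => (List.range w.toNat).map (fun (x : Nat) => pvCell occ emp (x : Int) (yk : Int)))
          ++ List.replicate (h.toNat - k) []).length := by
      rw [hlen]; simp; omega
    rw [pv_innerA occ emp w (k : Int) _ hbound]
    rw [Int.toNat_natCast]
    have hrep : h.toNat - k = (h.toNat - (k + 1)) + 1 := by omega
    have hgetD : ((List.range k).map (fun (yk : Nat) => (List.range w.toNat).map (fun (x : Nat) => pvCell occ emp (x : Int) (yk : Int)))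
          ++ List.replicate (h.toNat - k) []).getD k [] = [] := by
      rw [List.getD_eq_getElem?_getD, List.getElem?_append_right (by simp)]
      simp [hrep, List.replicate_succ]
    rw [hgetD, List.nil_append, hrep, List.replicate_succ,
      pv_set_append_len _ _ _ _ k (by simp)]
    rw [List.map_append]
    simp

theorem A_eq_grid (occ emp : List (Int × Int)) (h w : Int) :
    construct_seat_layout occ emp h w = pvGrid occ emp h.toNat w.toNat := by
  unfold construct_seat_layout
  simp only []
  rw [PySem.List.foldl_append_singleton_eq_map (f := fun _ => ([] : List String))]
  rw [List.nil_append]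
  have hmap : (PySem.List.pyRange 0 h 1).map (fun _ => ([] : List String)) = List.replicate h.toNat [] := by
    rw [List.map_const']
    simp [PySem.List.length_pyRange_one]
  rw [hmap]
  rw [PySem.List.pyRange_one 0 h, List.foldl_map]
  simp only [zero_add, sub_zero, Int.sub_zero]
  rw [pv_outerA occ emp h w h.toNat (Nat.le_refl _)]
  simp [pvGrid]

-- ===== B-side: the scatter builds pvGrid =====
theorem pv_scatter_cons (s : String) (h w : Int) (p : Int × Int) (t : List (Int × Int)) (g : List (List String)) :
    pvScatter s h w (p :: t) g = pvScatter s h w t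
      (if 0 ≤ p.1 ∧ p.1 < w ∧ 0 ≤ p.2 ∧ p.2 < h then
        g.set p.2.toNat ((g.getD p.2.toNat []).set p.1.toNat s) else g) := rfl

theorem pv_scatter_length (s : String) (h w : Int) (t : List (Int × Int)) :
    ∀ g : List (List String), (pvScatter s h w t g).length = g.length := by
  induction t with
  | nil => intro g; rfl
  | cons p t ih =>
    intro g
    rw [pv_scatter_cons, ih]
    split <;> simp

theorem pv_scatter_rowlen (s : String) (h w : Int) (t : List (Int × Int)) :
    ∀ (g : List (List String)), g.length = h.toNat → ∀ (y : Nat),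
      ((pvScatter s h w t g).getD y []).length = (g.getD y []).length := by
  induction t with
  | nil => intro g _ y; rfl
  | cons p t ih =>
    intro g hg y
    rw [pv_scatter_cons]
    split
    · rename_i hguard
      have hb : p.2.toNat < g.length := by omega
      rw [ih _ (by simp [hg])]
      by_cases hy : p.2.toNat = y
      · subst hy
        rw [pv_getD_set_self _ _ _ _ hb, List.length_set]
      · rw [pv_getD_set_ne _ _ _ _ _ hy]
    · rw [ih _ hg]

theorem pv_scatter_cell (s : String) (h w : Int) (t : List (Int × Int)) :
    ∀ (g : List (List String)), g.length = h.toNat →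
      ∀ (y x : Nat), y < h.toNat → x < w.toNat → (g.getD y []).length = w.toNat →
      ((pvScatter s h w t g).getD y []).getD x "" =
        if t.contains ((x : Int), (y : Int)) then s else (g.getD y []).getD x "" := by
  induction t with
  | nil => intro g _ y x _ _ _; simp [pvScatter]
  | cons p t ih =>
    intro g hg y x hy hx hrowy
    rw [pv_scatter_cons]
    by_cases hguard : 0 ≤ p.1 ∧ p.1 < w ∧ 0 ≤ p.2 ∧ p.2 < h
    · rw [if_pos hguard]
      have hj : p.2.toNat < g.length := by omega
      set g' := g.set p.2.toNat ((g.getD p.2.toNat []).set p.1.toNat s) with hg'def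
      have hg' : g'.length = h.toNat := by simp [hg'def, hg]
      by_cases hpc : p = ((x : Int), (y : Int))
      · have hjy : p.2.toNat = y := by rw [hpc]; simp
        have hix : p.1.toNat = x := by rw [hpc]; simp
        have hcell : (g'.getD y []).getD x "" = s := by
          rw [hg'def, hjy, hix, pv_getD_set_self _ _ _ _ (hjy ▸ hj),
            pv_getD_set_self _ _ _ _ (by omega)]
        have hrow' : (g'.getD y []).length = w.toNat := by
          rw [hg'def, hjy, pv_getD_set_self _ _ _ _ (hjy ▸ hj), List.length_set]
          exact hrowy
        rw [ih g' hg' y x hy hx hrow', hcell]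
        have hbp : ((((x : Int), (y : Int))) == p) = true := by simp [hpc]
        rw [List.contains_cons, hbp, Bool.true_or]
        simp
      · have hcell : (g'.getD y []).getD x "" = (g.getD y []).getD x "" := by
          by_cases hjy : p.2.toNat = y
          · have hp2 : p.2 = (y : Int) := by omega
            have hp1 : p.1 ≠ (x : Int) := by
              intro hc; exact hpc (Prod.ext hc hp2)
            have hix : p.1.toNat ≠ x := by omega
            rw [hg'def, hjy, pv_getD_set_self _ _ _ _ (hjy ▸ hj),
              pv_getD_set_ne _ _ _ _ _ hix]
          · rw [hg'def, pv_getD_set_ne _ _ _ _ _ hjy]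
        have hrow' : (g'.getD y []).length = (g.getD y []).length := by
          by_cases hjy : p.2.toNat = y
          · rw [hg'def, hjy, pv_getD_set_self _ _ _ _ (hjy ▸ hj), List.length_set]
          · rw [hg'def, pv_getD_set_ne _ _ _ _ _ hjy]
        rw [ih g' hg' y x hy hx (hrow'.trans hrowy), hcell]
        have hbp : ((((x : Int), (y : Int))) == p) = false := by
          simp [beq_iff_eq]; intro hc; exact hpc (hc.symm)
        rw [List.contains_cons, hbp, Bool.false_or]
    · rw [if_neg hguard]
      have hpc : p ≠ ((x : Int), (y : Int)) := by
        intro hc; subst hc; exact hguard ⟨by omega, by omega, by omega, by omega⟩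
      rw [ih g hg y x hy hx hrowy]
      have hbp : ((((x : Int), (y : Int))) == p) = false := by
        simp [beq_iff_eq]; intro hc; exact hpc (hc.symm)
      rw [List.contains_cons, hbp, Bool.false_or]

theorem B_eq_grid (occ emp : List (Int × Int)) (h w : Int) :
    construct_seat_layout_alt occ emp h w = pvGrid occ emp h.toNat w.toNat := by
  unfold construct_seat_layout_alt
  simp only []
  set g0 : List (List String) := (List.range h.toNat).map (fun _ => List.replicate w.toNat ".") with hg0def
  set g1 : List (List String) := pvScatter "L" h w emp g0 with hg1def
  have hg0 : g0.length = h.toNat := by simp [hg0def]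
  have hg1 : g1.length = h.toNat := by rw [hg1def, pv_scatter_length]; exact hg0
  have hrowval : ∀ y : Nat, y < h.toNat → g0.getD y [] = List.replicate w.toNat "." := by
    intro y hy
    rw [hg0def, List.getD_eq_getElem?_getD]
    simp [List.getElem?_map, List.getElem?_range, hy]
  have hrow0 : ∀ y : Nat, y < h.toNat → (g0.getD y []).length = w.toNat := by
    intro y hy
    rw [hrowval y hy, List.length_replicate]
  have hcell0 : ∀ y x : Nat, y < h.toNat → x < w.toNat → (g0.getD y []).getD x "" = "." := by
    intro y x hy hx
    rw [hrowval y hy, List.getD_eq_getElem?_getD, List.getElem?_replicate]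
    simp [hx]
  have hrow1 : ∀ y : Nat, y < h.toNat → (g1.getD y []).length = w.toNat := by
    intro y hy
    rw [hg1def, pv_scatter_rowlen "L" h w emp g0 hg0]
    exact hrow0 y hy
  have hlenB : (pvScatter "#" h w occ g1).length = h.toNat := by
    rw [pv_scatter_length]; exact hg1
  apply List.ext_getElem (by simp [pvGrid, hlenB])
  intro y hy1 hy2
  have hy : y < h.toNat := by simpa [pvGrid] using hy2
  have hrowB : ((pvScatter "#" h w occ g1).getD y []).length = w.toNat := by
    rw [pv_scatter_rowlen "#" h w occ g1 hg1]; exact hrow1 y hy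
  rw [← List.getD_eq_getElem _ [] hy1]
  have hRHS : (pvGrid occ emp h.toNat w.toNat)[y]'hy2 =
      (List.range w.toNat).map (fun (x : Nat) => pvCell occ emp (x : Int) (y : Int)) := by
    simp [pvGrid]
  rw [hRHS]
  apply List.ext_getElem (by simpa using hrowB)
  intro x hx1 hx2
  have hx : x < w.toNat := by simpa using hx2
  rw [← List.getD_eq_getElem _ "" hx1]
  have hRHS2 : ((List.range w.toNat).map (fun (x : Nat) => pvCell occ emp (x : Int) (y : Int)))[x]'hx2 =
      pvCell occ emp (x : Int) (y : Int) := by simp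
  rw [hRHS2]
  rw [pv_scatter_cell "#" h w occ g1 hg1 y x hy hx (hrow1 y hy)]
  rw [hg1def, pv_scatter_cell "L" h w emp g0 hg0 y x hy hx (hrow0 y hy)]
  rw [hcell0 y x hy hx]
  simp [pvCell]

theorem A_eq_B (occ emp : List (Int × Int)) (h w : Int) :
    construct_seat_layout occ emp h w = construct_seat_layout_alt occ emp h w := by
  rw [A_eq_grid, B_eq_grid]

-- ===== VERDICT (by name: the statement is the Claim_ definition above) =====
theorem construct_seat_layout_spec : Claim_equal_construct_seat_layout := by
  intro occ emp h w _
  unfold Spec_construct_seat_layout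
  exact A_eq_B occ emp h w
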